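-- pv_equiv track=rewrite | github.com/fkie-cad/iva | matching/cpe_sorter.py | create_version_prefixes
-- ===== SOURCE A (Python) =====
-- def create_version_prefixes(software_version):
--     version_elements = str(software_version).split('.')
--     if len(version_elements) > 1:
--         prefixes = [version_elements[0]]
--         for i in range(1, len(version_elements)):
--             prefixes.append(prefixes[i - 1] + '.' + str(version_elements[i]))
--         prefixes = list(reversed(prefixes))
--         return prefixes
--     return []
-- ===== SOURCE B (Python) =====
-- def create_version_prefixes(software_version):
--     s = str(software_version)
--     dots = [i for i, c in enumerate(s) if c == '.']
--     if not dots: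
--         return []
--     return [s] + [s[:i] for i in reversed(dots)]
-- ===== Notes on version B (the rewrite author's own statement) =====
-- stated objective: alternative
-- what changed: B replaces A's split-into-segments + cumulative string concatenation + final reversal by a single scan that records the dot positions and then emits the full string followed by the slices s[:i] for the dot positions in reverse; no split, no list of growing prefixes, no reversal of an accumulated list.
import Mathlib
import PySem

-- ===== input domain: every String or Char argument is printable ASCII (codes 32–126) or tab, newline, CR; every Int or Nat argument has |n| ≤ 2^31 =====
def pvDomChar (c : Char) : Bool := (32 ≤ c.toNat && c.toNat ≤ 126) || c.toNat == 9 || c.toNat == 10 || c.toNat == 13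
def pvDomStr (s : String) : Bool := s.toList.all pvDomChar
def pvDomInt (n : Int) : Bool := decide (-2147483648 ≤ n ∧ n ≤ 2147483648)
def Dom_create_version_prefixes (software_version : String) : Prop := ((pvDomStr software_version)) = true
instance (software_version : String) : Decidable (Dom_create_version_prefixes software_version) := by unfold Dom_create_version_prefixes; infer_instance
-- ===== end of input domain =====

-- B builds the reversed prefix list from the dot positions of the string (one scan, then slices)
-- instead of A's split + cumulative concatenation + final reversal; return values agree everywhere.

-- ===== PORT A =====
-- loop indices are always in range, so pyGetD's default is never used
def create_version_prefixes (software_version : String) : List String :=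
  let version_elements := PySem.Chars.splitOn software_version.toList ['.']
  if 1 < version_elements.length then
    let prefixes :=
      (PySem.List.pyRange 1 (version_elements.length : Int) 1).foldl
        (fun prefixes i =>
          prefixes ++ [PySem.List.pyGetD prefixes (i - 1) [] ++ '.' :: PySem.List.pyGetD version_elements i []])
        [PySem.List.pyGetD version_elements 0 []]
    prefixes.reverse.map String.ofList
  else []

-- ===== PORT B =====
def create_version_prefixes_alt (software_version : String) : List String :=
  let s := software_version.toList
  let dots := ((PySem.List.enumerate s).filter (fun p => p.2 == '.')).map Prod.fst
  if dots.isEmpty then []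
  else String.ofList s :: dots.reverse.map (fun i => String.ofList (PySem.List.slice s none (some i)))

-- ===== PRECONDITION & SPEC =====
def Spec_create_version_prefixes (software_version : String) (out : List String) : Prop := out = create_version_prefixes_alt software_version
instance (software_version : String) (out : List String) : Decidable (Spec_create_version_prefixes software_version out) := by unfold Spec_create_version_prefixes; infer_instance

-- ===== CLAIM (what is proved, stated in full; the proofs are below) =====
def Claim_equal_create_version_prefixes : Prop := ∀ (software_version : String), Dom_create_version_prefixes software_version → Spec_create_version_prefixes software_version (create_version_prefixes software_version)

-- ===== LEMMAS AND PROOFS =====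

-- reference segment split on '.', as Python's split('.') produces it
def mySplit : List Char → List (List Char)
  | [] => [[]]
  | c :: cs => if c = '.' then [] :: mySplit cs else (c :: (mySplit cs).headI) :: (mySplit cs).tail

-- positions of '.' in the string
def dotsN : List Char → List Nat
  | [] => []
  | c :: cs => if c = '.' then 0 :: (dotsN cs).map (· + 1) else (dotsN cs).map (· + 1)

-- '.'.join
def joinDots : List (List Char) → List Char
  | [] => []
  | [x] => x
  | x :: y :: xs => x ++ '.' :: joinDots (y :: xs)

theorem mySplit_ne_nil (cs : List Char) : mySplit cs ≠ [] := by
  cases cs with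
  | nil => simp [mySplit]
  | cons c cs => simp only [mySplit]; split_ifs <;> simp

theorem mySplit_eq_headI_tail (cs : List Char) :
    mySplit cs = (mySplit cs).headI :: (mySplit cs).tail := by
  cases h : mySplit cs with
  | nil => exact absurd h (mySplit_ne_nil cs)
  | cons a t => simp

theorem go_eq (fuel : Nat) : ∀ (l cur : List Char) (acc : List (List Char)), l.length ≤ fuel →
    PySem.Chars.splitOn.go ['.'] fuel l cur acc
      = acc.reverse ++ (cur.reverse ++ (mySplit l).headI) :: (mySplit l).tail := by
  induction fuel with
  | zero =>
    intro l cur acc hl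
    have : l = [] := by simpa using List.length_eq_zero_iff.mp (Nat.le_zero.mp hl)
    subst this
    simp [PySem.Chars.splitOn.go, mySplit]
  | succ f ih =>
    intro l cur acc hl
    cases l with
    | nil => simp [PySem.Chars.splitOn.go, mySplit]
    | cons c rest =>
      by_cases hc : c = '.'
      · subst hc
        have hpre : List.isPrefixOf ['.'] ('.' :: rest) = true := by
          simp [List.isPrefixOf]
        rw [PySem.Chars.splitOn.go]
        simp only [hpre, if_true, List.length_cons, List.length_nil, List.drop_succ_cons,
          List.drop_zero]
        rw [ih rest [] (cur.reverse :: acc) (by simp at hl; omega)]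
        rw [show mySplit ('.' :: rest) = [] :: mySplit rest from by simp [mySplit]]
        rw [mySplit_eq_headI_tail rest]
        simp
      · have hpre : List.isPrefixOf ['.'] (c :: rest) = false := by
          simp [List.isPrefixOf]
          exact fun h => hc h.symm
        rw [PySem.Chars.splitOn.go]
        simp only [hpre, Bool.false_eq_true, if_false]
        rw [ih rest (c :: cur) acc (by simp at hl; omega)]
        rw [show mySplit (c :: rest) = (c :: (mySplit rest).headI) :: (mySplit rest).tail from by
          simp [mySplit, hc]]
        simp

theorem splitOn_eq_mySplit (cs : List Char) :
    PySem.Chars.splitOn cs ['.'] = mySplit cs := by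
  show PySem.Chars.splitOn.go ['.'] (cs.length + 1) cs [] [] = mySplit cs
  rw [go_eq (cs.length + 1) cs [] [] (by omega)]
  simpa using (mySplit_eq_headI_tail cs).symm

theorem joinDots_cons_cons (c : Char) (h : List Char) (u : List (List Char)) :
    joinDots ((c :: h) :: u) = c :: joinDots (h :: u) := by
  cases u <;> simp [joinDots]

theorem joinDots_nil_cons (u : List (List Char)) (hu : u ≠ []) :
    joinDots ([] :: u) = '.' :: joinDots u := by
  cases u with
  | nil => exact absurd rfl hu
  | cons a t => simp [joinDots]

theorem joinDots_concat (xs : List (List Char)) (y : List Char) (hxs : xs ≠ []) :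
    joinDots (xs ++ [y]) = joinDots xs ++ '.' :: y := by
  induction xs with
  | nil => exact absurd rfl hxs
  | cons a t ih =>
    cases t with
    | nil => simp [joinDots]
    | cons b u =>
      have h2 := ih (by simp)
      show joinDots (a :: (b :: u ++ [y])) = joinDots (a :: b :: u) ++ '.' :: y
      rw [show (b :: u ++ [y]) = b :: (u ++ [y]) from rfl]
      simp only [joinDots]
      rw [show (b :: (u ++ [y])) = b :: u ++ [y] from rfl, h2]
      simp

theorem joinFull (cs : List Char) : joinDots (mySplit cs) = cs := by
  induction cs with
  | nil => simp [mySplit, joinDots]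
  | cons c cs ih =>
    by_cases hc : c = '.'
    · subst hc
      rw [show mySplit ('.' :: cs) = [] :: mySplit cs from by simp [mySplit]]
      rw [joinDots_nil_cons _ (mySplit_ne_nil cs), ih]
    · rw [show mySplit (c :: cs) = (c :: (mySplit cs).headI) :: (mySplit cs).tail from by
        simp [mySplit, hc]]
      rw [joinDots_cons_cons, ← mySplit_eq_headI_tail, ih]

theorem len_mySplit (cs : List Char) : (mySplit cs).length = (dotsN cs).length + 1 := by
  induction cs with
  | nil => simp [mySplit, dotsN]
  | cons c cs ih =>
    by_cases hc : c = '.' <;> simp [mySplit, dotsN, hc, ih]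

theorem dotsPfx (cs : List Char) :
    (dotsN cs).map (fun i => cs.take i)
      = (List.range (dotsN cs).length).map (fun k => joinDots ((mySplit cs).take (k + 1))) := by
  induction cs with
  | nil => simp [dotsN]
  | cons c cs ih =>
    by_cases hc : c = '.'
    · subst hc
      rw [show dotsN ('.' :: cs) = 0 :: (dotsN cs).map (· + 1) from by simp [dotsN]]
      rw [show mySplit ('.' :: cs) = [] :: mySplit cs from by simp [mySplit]]
      simp only [List.length_cons, List.length_map, List.range_succ_eq_map, List.map_cons,
        List.map_map, List.take_zero, List.take_succ_cons]
      rw [show joinDots [[]] = ([] : List Char) from rfl]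
      congr 1
      have e1 : ∀ i ∈ dotsN cs,
          ((fun i => List.take i ('.' :: cs)) ∘ (· + 1)) i = '.' :: List.take i cs := by
        intro i _; simp
      have e2 : ∀ k ∈ List.range (dotsN cs).length,
          ((fun k => joinDots ([] :: List.take k (mySplit cs))) ∘ Nat.succ) k
            = '.' :: joinDots ((mySplit cs).take (k + 1)) := by
        intro k _
        simp only [Function.comp_apply, Nat.succ_eq_add_one]
        rw [joinDots_nil_cons _ (by simp [List.take_eq_nil_iff, mySplit_ne_nil cs])]
      rw [List.map_congr_left e1, List.map_congr_left e2]
      have h3 := congrArg (List.map (fun x : List Char => '.' :: x)) ih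
      simpa [List.map_map, Function.comp_def] using h3
    · rw [show dotsN (c :: cs) = (dotsN cs).map (· + 1) from by simp [dotsN, hc]]
      rw [show mySplit (c :: cs) = (c :: (mySplit cs).headI) :: (mySplit cs).tail from by
        simp [mySplit, hc]]
      simp only [List.length_map, List.map_map, List.take_succ_cons]
      have e1 : ∀ i ∈ dotsN cs,
          ((fun i => List.take i (c :: cs)) ∘ (· + 1)) i = c :: List.take i cs := by
        intro i _; simp
      have e2 : ∀ k ∈ List.range (dotsN cs).length,
          (fun k => joinDots ((c :: (mySplit cs).headI) :: List.take k (mySplit cs).tail)) k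
            = c :: joinDots ((mySplit cs).take (k + 1)) := by
        intro k _
        show joinDots ((c :: (mySplit cs).headI) :: List.take k (mySplit cs).tail)
            = c :: joinDots (List.take (k + 1) (mySplit cs))
        rw [joinDots_cons_cons]
        congr 1
        conv_rhs => rw [mySplit_eq_headI_tail cs]
        rw [List.take_succ_cons]
      rw [List.map_congr_left e1, List.map_congr_left e2]
      have h3 := congrArg (List.map (fun x : List Char => c :: x)) ih
      simpa [List.map_map, Function.comp_def] using h3

theorem map_shift (d : List Nat) (start : Int) :
    (d.map (· + 1)).map (fun n : Nat => start + (n : Int))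
      = d.map (fun n : Nat => (start + 1) + (n : Int)) := by
  rw [List.map_map]
  refine List.map_congr_left (fun n _ => ?_)
  simp only [Function.comp_apply]
  push_cast
  ring

theorem enumDots (cs : List Char) : ∀ (start : Int),
    ((PySem.List.enumerate cs start).filter (fun p => p.2 == '.')).map Prod.fst
      = (dotsN cs).map (fun n : Nat => start + (n : Int)) := by
  induction cs with
  | nil => intro start; simp [PySem.List.enumerate, dotsN]
  | cons c cs ih =>
    intro start
    rw [show PySem.List.enumerate (c :: cs) start
          = (start, c) :: PySem.List.enumerate cs (start + 1) from by
        simp [PySem.List.enumerate]]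
    by_cases hc : c = '.'
    · subst hc
      rw [show dotsN ('.' :: cs) = 0 :: (dotsN cs).map (· + 1) from by simp [dotsN]]
      simp only [List.filter_cons, beq_self_eq_true, if_true, List.map_cons]
      rw [ih (start + 1), map_shift]
      simp
    · rw [show dotsN (c :: cs) = (dotsN cs).map (· + 1) from by simp [dotsN, hc]]
      simp only [List.filter_cons]
      rw [show ((c == '.') : Bool) = false from by simp [hc]]
      simp only [Bool.false_eq_true, if_false]
      rw [ih (start + 1), map_shift]

-- the A-side loop characterization
theorem foldA (segs : List (List Char)) (hne : segs ≠ []) :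
    ∀ m : Nat, m ≤ segs.length - 1 →
      (PySem.List.pyRange 1 (1 + (m : Int)) 1).foldl
        (fun prefixes i =>
          prefixes ++ [PySem.List.pyGetD prefixes (i - 1) [] ++ '.' :: PySem.List.pyGetD segs i []])
        [PySem.List.pyGetD segs 0 []]
      = (List.range (m + 1)).map (fun k => joinDots (segs.take (k + 1))) := by
  intro m
  induction m with
  | zero =>
    intro _
    rw [show (1 + ((0 : Nat) : Int)) = 1 from by norm_num]
    rw [PySem.List.pyRange_one_eq_nil (le_refl 1)]
    cases segs with
    | nil => exact absurd rfl hne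
    | cons a t => simp [PySem.List.pyGetD_zero, joinDots, List.range_succ]
  | succ m ih =>
    intro hm
    have hpos : 0 < segs.length := List.length_pos_of_ne_nil hne
    have hlen : m + 1 < segs.length := by omega
    rw [show (1 + ((m + 1 : Nat) : Int)) = (1 + (m : Int)) + 1 from by push_cast; ring]
    rw [PySem.List.pyRange_one_succ_right (by omega)]
    rw [List.foldl_append, ih (by omega)]
    simp only [List.foldl_cons, List.foldl_nil]
    rw [show (1 + (m : Int)) - 1 = ((m : Nat) : Int) from by ring]
    rw [show (1 + (m : Int)) = ((m + 1 : Nat) : Int) from by push_cast; ring]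
    rw [PySem.List.pyGetD_natCast, PySem.List.pyGetD_natCast]
    have e2 : (List.map (fun k => joinDots (segs.take (k + 1))) (List.range (m + 1))).getD m []
        = joinDots (segs.take (m + 1)) := by
      rw [List.getD_eq_getElem?_getD]
      simp
    rw [e2]
    have e4 : segs.getD (m + 1) [] = segs[m + 1] := by
      rw [List.getD_eq_getElem?_getD, List.getElem?_eq_getElem hlen]
      rfl
    rw [e4]
    rw [show List.range (m + 1 + 1) = List.range (m + 1) ++ [m + 1] from List.range_succ]
    rw [List.map_append]
    congr 1
    simp only [List.map_cons, List.map_nil]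
    have e5 : segs.take (m + 2) = segs.take (m + 1) ++ [segs[m + 1]] := by
      rw [List.take_add_one]
      simp [List.getElem?_eq_getElem hlen]
    rw [e5, joinDots_concat _ _ (by simp [List.take_eq_nil_iff, hne])]

theorem main_lemma (sv : String) :
    create_version_prefixes sv = create_version_prefixes_alt sv := by
  simp only [create_version_prefixes, create_version_prefixes_alt]
  rw [splitOn_eq_mySplit, enumDots sv.toList 0]
  have hdots : (dotsN sv.toList).map (fun n : Nat => (0 : Int) + (n : Int))
      = (dotsN sv.toList).map (fun n : Nat => (n : Int)) :=
    List.map_congr_left (fun n _ => by ring)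
  rw [hdots]
  by_cases hd : dotsN sv.toList = []
  · rw [if_neg (by rw [len_mySplit, hd]; simp), if_pos (by simp [hd])]
  · have hne := mySplit_ne_nil sv.toList
    have hLen := len_mySplit sv.toList
    have hdpos : 0 < (dotsN sv.toList).length := List.length_pos_of_ne_nil hd
    rw [if_pos (by omega), if_neg (by simp [hd])]
    rw [show (((mySplit sv.toList).length : Nat) : Int)
          = 1 + (((dotsN sv.toList).length : Nat) : Int) from by rw [hLen]; push_cast; ring]
    rw [foldA (mySplit sv.toList) hne (dotsN sv.toList).length (by omega)]
    rw [show List.range ((dotsN sv.toList).length + 1)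
          = List.range (dotsN sv.toList).length ++ [(dotsN sv.toList).length] from List.range_succ]
    rw [List.map_append, List.reverse_append]
    simp only [List.map_cons, List.map_nil, List.reverse_cons, List.reverse_nil, List.nil_append,
      List.singleton_append]
    have hfull : joinDots ((mySplit sv.toList).take ((dotsN sv.toList).length + 1)) = sv.toList := by
      rw [← hLen, List.take_length]
      exact joinFull sv.toList
    rw [hfull]
    rw [List.map_reverse, List.map_reverse]
    congr 1
    have e : List.map (fun i : Int => String.ofList (PySem.List.slice sv.toList none (some i)))
          (List.map (fun n : Nat => (n : Int)) (dotsN sv.toList))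
        = List.map String.ofList ((dotsN sv.toList).map (fun n : Nat => sv.toList.take n)) := by
      rw [List.map_map, List.map_map]
      refine List.map_congr_left (fun n _ => ?_)
      simp [PySem.List.slice_to_natCast]
    rw [e, dotsPfx]

-- ===== VERDICT (by name: the statement is the Claim_ definition above) =====
theorem create_version_prefixes_spec : Claim_equal_create_version_prefixes := by
  intro s _
  show create_version_prefixes s = create_version_prefixes_alt s
  exact main_lemma s
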